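-- pv_equiv track=rewrite | github.com/bcgugmgigughi-source/htm | hadahwalm9wd.py | _classify_sku
-- ===== SOURCE A (Python) =====
-- def _classify_sku(sku: str) -> str:
--     s = sku.upper()
--     if any(k in s for k in ("GAME_PASS", "GAMEPASS", "XBOXPASS", "XBOX_PASS", "XGPU", "XGPC", "XGPCORE")):
--         if any(k in s for k in ("ULTIMATE", "XGPU")):
--             return "Xbox Game Pass Ultimate"
--         if any(k in s for k in ("PC", "PCGAME", "XGPC")):
--             return "Xbox Game Pass for PC"
--         if any(k in s for k in ("CORE", "XGPCORE")):
--             return "Xbox Game Pass Core"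
--         if "CONSOLE" in s:
--             return "Xbox Game Pass Console"
--         return "Xbox Game Pass"
--     if any(k in s for k in ("OFFICE", "O365")):
--         if "BUSINESS" in s:
--             return "Office 365 Business"
--         return "Office 365"
--     if any(k in s for k in ("M365", "MICROSOFT365")):
--         return "Microsoft 365"
--     if any(k in s for k in ("POWER_BI", "POWERBI")):
--         return "Power BI"
--     if "VISIO" in s:
--         return "Visio"
--     if "PROJECT" in s:
--         return "Project"
--     return sku
-- ===== SOURCE B (Python) =====
-- # Argmin re-implementation: compute ALL keyword hits first, then pick the
-- # highest-priority (smallest-numbered) family with min(), instead of an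
-- # ordered cascade of early-returning membership tests.
--
-- _FAMILY_PRIO = {
--     "GAME_PASS": 0, "GAMEPASS": 0, "XBOXPASS": 0, "XBOX_PASS": 0,
--     "XGPU": 0, "XGPC": 0, "XGPCORE": 0,
--     "OFFICE": 1, "O365": 1,
--     "M365": 2, "MICROSOFT365": 2,
--     "POWER_BI": 3, "POWERBI": 3,
--     "VISIO": 4,
--     "PROJECT": 5,
-- }
--
-- _XBOX_SUB_PRIO = {
--     "ULTIMATE": 0, "XGPU": 0,
--     "PC": 1, "PCGAME": 1, "XGPC": 1,
--     "CORE": 2, "XGPCORE": 2,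
--     "CONSOLE": 3,
-- }
--
-- _XBOX_LABELS = ["Xbox Game Pass Ultimate", "Xbox Game Pass for PC",
--                 "Xbox Game Pass Core", "Xbox Game Pass Console", "Xbox Game Pass"]
--
-- _FLAT_LABELS = {2: "Microsoft 365", 3: "Power BI", 4: "Visio", 5: "Project"}
--
--
-- def _dispatch(sku, s, fam):
--     if fam == 0:
--         return _XBOX_LABELS[min((p for k, p in _XBOX_SUB_PRIO.items() if k in s), default=4)]
--     if fam == 1:
--         return "Office 365 Business" if "BUSINESS" in s else "Office 365"
--     return _FLAT_LABELS.get(fam, sku)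
--
--
-- def _classify_sku(sku: str) -> str:
--     s = sku.upper()
--     return _dispatch(sku, s, min((p for k, p in _FAMILY_PRIO.items() if k in s), default=6))
-- ===== Notes on version B (the rewrite author's own statement) =====
-- stated objective: alternative
-- what changed: Instead of A's ordered cascade of early-returning any()-membership tests, B first computes every keyword hit against two priority tables and then selects the winning family and Xbox sub-label as the minimum priority via min(..., default=...), dispatching on that number.
import Mathlib
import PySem

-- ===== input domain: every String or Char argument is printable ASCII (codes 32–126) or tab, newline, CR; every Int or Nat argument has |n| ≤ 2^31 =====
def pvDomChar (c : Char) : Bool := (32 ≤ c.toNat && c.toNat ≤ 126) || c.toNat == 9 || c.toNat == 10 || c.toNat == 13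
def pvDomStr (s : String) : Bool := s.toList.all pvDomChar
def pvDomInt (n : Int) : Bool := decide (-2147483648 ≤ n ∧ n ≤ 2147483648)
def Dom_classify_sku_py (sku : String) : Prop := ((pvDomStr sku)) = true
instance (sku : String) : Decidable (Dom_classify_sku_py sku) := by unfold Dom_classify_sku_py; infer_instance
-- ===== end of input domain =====

-- B replaces A's ordered cascade of early-returning membership tests by a staged
-- argmin computation: match all keywords against priority tables, take the
-- minimum priority with min(), then dispatch on that number (objective: alternative).

-- ===== PORT A =====
-- literal transliteration: any(k in s for k in (...)) = List.any over the same literal tuple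
def classify_sku_py (sku : String) : String :=
  let s := PySem.Str.upper sku
  if ["GAME_PASS", "GAMEPASS", "XBOXPASS", "XBOX_PASS", "XGPU", "XGPC", "XGPCORE"].any (fun k => PySem.Str.isIn k s) then
    if ["ULTIMATE", "XGPU"].any (fun k => PySem.Str.isIn k s) then "Xbox Game Pass Ultimate"
    else if ["PC", "PCGAME", "XGPC"].any (fun k => PySem.Str.isIn k s) then "Xbox Game Pass for PC"
    else if ["CORE", "XGPCORE"].any (fun k => PySem.Str.isIn k s) then "Xbox Game Pass Core"
    else if PySem.Str.isIn "CONSOLE" s then "Xbox Game Pass Console"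
    else "Xbox Game Pass"
  else if ["OFFICE", "O365"].any (fun k => PySem.Str.isIn k s) then
    if PySem.Str.isIn "BUSINESS" s then "Office 365 Business" else "Office 365"
  else if ["M365", "MICROSOFT365"].any (fun k => PySem.Str.isIn k s) then "Microsoft 365"
  else if ["POWER_BI", "POWERBI"].any (fun k => PySem.Str.isIn k s) then "Power BI"
  else if PySem.Str.isIn "VISIO" s then "Visio"
  else if PySem.Str.isIn "PROJECT" s then "Project"
  else sku

-- ===== PORT B =====
-- priority tables of Source B (dicts in insertion order)
def pvFamPrio : List (String × Int) :=
  [("GAME_PASS", 0), ("GAMEPASS", 0), ("XBOXPASS", 0), ("XBOX_PASS", 0),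
   ("XGPU", 0), ("XGPC", 0), ("XGPCORE", 0),
   ("OFFICE", 1), ("O365", 1),
   ("M365", 2), ("MICROSOFT365", 2),
   ("POWER_BI", 3), ("POWERBI", 3),
   ("VISIO", 4),
   ("PROJECT", 5)]

def pvXboxSubPrio : List (String × Int) :=
  [("ULTIMATE", 0), ("XGPU", 0),
   ("PC", 1), ("PCGAME", 1), ("XGPC", 1),
   ("CORE", 2), ("XGPCORE", 2),
   ("CONSOLE", 3)]

def pvXboxLabels : List String :=
  ["Xbox Game Pass Ultimate", "Xbox Game Pass for PC",
   "Xbox Game Pass Core", "Xbox Game Pass Console", "Xbox Game Pass"]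

def pvFlatLabels : PySem.Dict Int String :=
  PySem.Dict.ofList [((2 : Int), "Microsoft 365"), (3, "Power BI"), (4, "Visio"), (5, "Project")]

-- the generator (p for k, p in tbl.items() if k in s)
def pvMatched (s : String) (tbl : List (String × Int)) : List Int :=
  tbl.filterMap (fun kp => if PySem.Str.isIn kp.1 s then some kp.2 else none)

def pvDispatch (sku s : String) (fam : Int) : String :=
  if fam = 0 then
    -- _XBOX_LABELS[...]: the index is always 0..4, so the "" default is never used
    PySem.List.pyGetD pvXboxLabels
      ((PySem.List.min? (pvMatched s pvXboxSubPrio) (fun p => p)).getD 4) ""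
  else if fam = 1 then
    if PySem.Str.isIn "BUSINESS" s then "Office 365 Business" else "Office 365"
  else
    PySem.Dict.getD pvFlatLabels fam sku

def classify_sku_py_alt (sku : String) : String :=
  let s := PySem.Str.upper sku
  pvDispatch sku s ((PySem.List.min? (pvMatched s pvFamPrio) (fun p => p)).getD 6)

-- ===== PRECONDITION & SPEC =====
def Spec_classify_sku_py (sku : String) (out : String) : Prop := out = classify_sku_py_alt sku
instance (sku : String) (out : String) : Decidable (Spec_classify_sku_py sku out) := by unfold Spec_classify_sku_py; infer_instance

-- ===== CLAIM (what is proved, stated in full; the proofs are below) =====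
def Claim_equal_classify_sku_py : Prop := ∀ (sku : String), Dom_classify_sku_py sku → Spec_classify_sku_py sku (classify_sku_py sku)

-- ===== LEMMAS AND PROOFS =====

-- the first-hit reading of a min over the hits of a priority table whose
-- priorities are nondecreasing and bounded by the default
def pvFirstHit (s : String) : List (String × Int) → Int → Int
  | [], d => d
  | kp :: rest, d => if PySem.Str.isIn kp.1 s then kp.2 else pvFirstHit s rest d

lemma pvMin_matched_eq_firstHit (s : String) (d : Int) :
    ∀ (tbl : List (String × Int)),
      tbl.Pairwise (fun a b => a.2 ≤ b.2) → (∀ kp ∈ tbl, kp.2 ≤ d) →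
      (PySem.List.min? (pvMatched s tbl) (fun p => p)).getD d = pvFirstHit s tbl d := by
  intro tbl
  induction tbl with
  | nil => intro _ _; simp [pvMatched, PySem.List.min?, pvFirstHit]
  | cons kp rest ih =>
    intro hpw hd
    rcases List.pairwise_cons.mp hpw with ⟨hle, hpw'⟩
    by_cases hin : PySem.Str.isIn kp.1 s = true
    · have hm : pvMatched s (kp :: rest) = kp.2 :: pvMatched s rest := by
        simp only [pvMatched, List.filterMap_cons, hin, if_pos]
      rw [hm, PySem.List.min?_id_cons, Option.getD_some, pvFirstHit, if_pos hin]
      have hb : ∀ y ∈ pvMatched s rest, kp.2 ≤ y := by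
        intro y hy
        simp only [pvMatched, List.mem_filterMap] at hy
        rcases hy with ⟨kq, hkq, hsome⟩
        split at hsome
        · exact (Option.some_inj.mp hsome) ▸ hle kq hkq
        · exact absurd hsome (by simp)
      rcases PySem.List.foldl_min_le (pvMatched s rest) kp.2 with ⟨h1, _⟩
      rcases PySem.List.foldl_min_mem (pvMatched s rest) kp.2 with h | h
      · exact h
      · exact le_antisymm h1 (hb _ h)
    · have hm : pvMatched s (kp :: rest) = pvMatched s rest := by
        simp only [pvMatched, List.filterMap_cons, hin, Bool.false_eq_true,
          reduceIte]
      rw [hm, pvFirstHit, if_neg hin]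
      exact ih hpw' (fun kq hkq => hd kq (List.mem_cons_of_mem _ hkq))

-- ===== VERDICT (by name: the statement is the Claim_ definition above) =====
theorem classify_sku_py_spec : Claim_equal_classify_sku_py := by
  intro sku _
  simp only [Spec_classify_sku_py, classify_sku_py, classify_sku_py_alt]
  rw [pvMin_matched_eq_firstHit _ 6 pvFamPrio (by decide) (by decide)]
  simp only [pvFamPrio, pvFirstHit]
  simp only [apply_ite (pvDispatch sku (PySem.Str.upper sku))]
  simp only [pvDispatch, Int.reduceEq, reduceIte]
  rw [pvMin_matched_eq_firstHit _ 4 pvXboxSubPrio (by decide) (by decide)]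
  simp only [pvXboxSubPrio, pvFirstHit]
  simp only [apply_ite (fun i => PySem.List.pyGetD pvXboxLabels i "")]
  simp only [List.any_cons, List.any_nil, Bool.or_false]
  simp only [show PySem.List.pyGetD pvXboxLabels 0 "" = "Xbox Game Pass Ultimate" from rfl,
    show PySem.List.pyGetD pvXboxLabels 1 "" = "Xbox Game Pass for PC" from rfl,
    show PySem.List.pyGetD pvXboxLabels 2 "" = "Xbox Game Pass Core" from rfl,
    show PySem.List.pyGetD pvXboxLabels 3 "" = "Xbox Game Pass Console" from rfl,
    show PySem.List.pyGetD pvXboxLabels 4 "" = "Xbox Game Pass" from rfl,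
    show (∀ z : String, PySem.Dict.getD pvFlatLabels 2 z = "Microsoft 365") from fun _ => rfl,
    show (∀ z : String, PySem.Dict.getD pvFlatLabels 3 z = "Power BI") from fun _ => rfl,
    show (∀ z : String, PySem.Dict.getD pvFlatLabels 4 z = "Visio") from fun _ => rfl,
    show (∀ z : String, PySem.Dict.getD pvFlatLabels 5 z = "Project") from fun _ => rfl,
    show (∀ z : String, PySem.Dict.getD pvFlatLabels 6 z = z) from fun _ => rfl]
  generalize PySem.Str.isIn "GAME_PASS" (PySem.Str.upper sku) = b1
  generalize PySem.Str.isIn "GAMEPASS" (PySem.Str.upper sku) = b2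
  generalize PySem.Str.isIn "XBOXPASS" (PySem.Str.upper sku) = b3
  generalize PySem.Str.isIn "XBOX_PASS" (PySem.Str.upper sku) = b4
  generalize PySem.Str.isIn "XGPU" (PySem.Str.upper sku) = b5
  generalize PySem.Str.isIn "XGPC" (PySem.Str.upper sku) = b6
  generalize PySem.Str.isIn "XGPCORE" (PySem.Str.upper sku) = b7
  generalize PySem.Str.isIn "OFFICE" (PySem.Str.upper sku) = b8
  generalize PySem.Str.isIn "O365" (PySem.Str.upper sku) = b9
  generalize PySem.Str.isIn "M365" (PySem.Str.upper sku) = b10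
  generalize PySem.Str.isIn "MICROSOFT365" (PySem.Str.upper sku) = b11
  generalize PySem.Str.isIn "POWER_BI" (PySem.Str.upper sku) = b12
  generalize PySem.Str.isIn "POWERBI" (PySem.Str.upper sku) = b13
  generalize PySem.Str.isIn "VISIO" (PySem.Str.upper sku) = b14
  generalize PySem.Str.isIn "PROJECT" (PySem.Str.upper sku) = b15
  generalize PySem.Str.isIn "ULTIMATE" (PySem.Str.upper sku) = c1
  generalize PySem.Str.isIn "PC" (PySem.Str.upper sku) = c2
  generalize PySem.Str.isIn "PCGAME" (PySem.Str.upper sku) = c3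
  generalize PySem.Str.isIn "CORE" (PySem.Str.upper sku) = c4
  generalize PySem.Str.isIn "CONSOLE" (PySem.Str.upper sku) = c5
  generalize PySem.Str.isIn "BUSINESS" (PySem.Str.upper sku) = c6
  simp only [Bool.or_eq_true]
  simp only [← ite_or]
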